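-- pv_equiv track=rewrite | github.com/faisalarfhtm/waste-bounty-detector | utils.py | calculate_base_points
-- ===== SOURCE A (Python) =====
-- def calculate_base_points(detections):
--     """
--     Hitung poin dasar dari list detections.
--     """
--     score_map = {
--         "PET_Bottles": 3,
--         "Aluminium_Cans": 3,
--         "HDPE_Milk_Bottles": 2,
--     }
--     total = 0
--     for det in detections:
--         total += score_map.get(det["label"], 1)
--     return total
-- ===== SOURCE B (Python) =====
-- def calculate_base_points(detections):
--     """
--     Hitung poin dasar dari list detections.
--     """
--     score_map = {
--         "PET_Bottles": 3,
--         "Aluminium_Cans": 3,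
--         "HDPE_Milk_Bottles": 2,
--     }
--     counts = {}
--     for det in detections:
--         lbl = det["label"]
--         counts[lbl] = counts.get(lbl, 0) + 1
--     return sum(c * score_map.get(lbl, 1) for lbl, c in counts.items())
-- ===== Notes on version B (the rewrite author's own statement) =====
-- stated objective: alternative
-- what changed: B replaces A's single pass over every detection with a group-by: it builds a frequency table of labels first and then sums count * score over the distinct labels only.
import Mathlib
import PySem

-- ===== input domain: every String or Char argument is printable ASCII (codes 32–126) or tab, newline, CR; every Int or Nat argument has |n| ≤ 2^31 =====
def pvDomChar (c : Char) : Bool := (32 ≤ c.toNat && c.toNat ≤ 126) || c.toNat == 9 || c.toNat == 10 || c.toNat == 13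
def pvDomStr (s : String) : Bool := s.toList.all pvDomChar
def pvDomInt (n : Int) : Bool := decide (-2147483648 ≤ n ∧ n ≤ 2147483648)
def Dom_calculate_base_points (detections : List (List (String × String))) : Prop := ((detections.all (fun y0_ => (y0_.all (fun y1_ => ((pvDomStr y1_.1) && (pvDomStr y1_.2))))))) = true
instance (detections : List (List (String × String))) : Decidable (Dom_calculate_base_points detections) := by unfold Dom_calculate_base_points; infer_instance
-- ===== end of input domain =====

-- B builds a frequency table of the labels and sums count*score over DISTINCT labels (alternative decomposition; same result).
-- Both A and B raise KeyError on a detection without a "label" key; Pre_ excludes exactly those inputs.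

-- ===== PORT A =====
def pvScoreMap : PySem.Dict String Int :=
  PySem.Dict.ofList [("PET_Bottles", 3), ("Aluminium_Cans", 3), ("HDPE_Milk_Bottles", 2)]

-- det["label"] raises KeyError when missing; inside Pre_ the key is present, so getD with a dummy default is exact there.
def calculate_base_points (detections : List (List (String × String))) : Int :=
  detections.foldl (fun total det => total + pvScoreMap.getD ((PySem.Dict.mk det).getD "label" "") 1) 0

-- ===== PORT B =====
def calculate_base_points_alt (detections : List (List (String × String))) : Int :=
  let counts : PySem.Dict String Int :=
    detections.foldl (fun d det =>
      let lbl := (PySem.Dict.mk det).getD "label" ""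
      d.insert lbl (d.getD lbl 0 + 1)) PySem.Dict.empty
  (counts.items.map (fun p => p.2 * pvScoreMap.getD p.1 1)).sum

-- ===== PRECONDITION & SPEC =====
-- Pre_ excludes exactly the inputs where det["label"] raises KeyError (in both A and B): a detection dict lacking the key "label".
def Pre_calculate_base_points (detections : List (List (String × String))) : Prop :=
  ∀ det ∈ detections, (PySem.Dict.mk det).contains "label" = true
instance (detections : List (List (String × String))) : Decidable (Pre_calculate_base_points detections) := by unfold Pre_calculate_base_points; infer_instance
def pvWitness_calculate_base_points : (List (List (String × String))) := [[("label", "PET_Bottles")], [("label", "junk")]]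

def Spec_calculate_base_points (detections : List (List (String × String))) (out : Int) : Prop := out = calculate_base_points_alt detections
instance (detections : List (List (String × String))) (out : Int) : Decidable (Spec_calculate_base_points detections out) := by unfold Spec_calculate_base_points; infer_instance

-- ===== CLAIM (what is proved, stated in full; the proofs are below) =====
def Claim_equal_calculate_base_points : Prop := ∀ (detections : List (List (String × String))), Dom_calculate_base_points detections → Pre_calculate_base_points detections → Spec_calculate_base_points detections (calculate_base_points detections)

-- ===== LEMMAS AND PROOFS =====

-- A's fold is the plain sum of scores over the label sequence.
theorem pvA_eq_sum (detections : List (List (String × String))) :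
    calculate_base_points detections
      = ((detections.map (fun det => (PySem.Dict.mk det).getD "label" "")).map
          (fun l => pvScoreMap.getD l 1)).sum := by
  unfold calculate_base_points
  induction detections using List.reverseRecOn with
  | nil => simp
  | append_singleton xs x ih => simp [ih]

-- B's counter over detections is PySem.Dict.counter of the label sequence.
theorem pvB_counts (detections : List (List (String × String))) :
    detections.foldl (fun d det =>
      let lbl := (PySem.Dict.mk det).getD "label" ""
      d.insert lbl (d.getD lbl 0 + 1)) PySem.Dict.empty
      = PySem.Dict.counter (detections.map (fun det => (PySem.Dict.mk det).getD "label" "")) := by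
  rw [← PySem.Dict.foldl_insert_getD_add_one_eq_counter]
  exact (List.foldl_map (f := fun det => (PySem.Dict.mk det).getD "label" "")
    (g := fun (d : PySem.Dict String Int) x => d.insert x (d.getD x 0 + 1)) (l := detections)
    (init := PySem.Dict.empty)).symm

-- Summing count*score over the distinct labels equals summing score over all labels.
theorem pvCountSum (labels : List String) :
    ((PySem.Set.ofList labels).map (fun k => (labels.count k : Int) * pvScoreMap.getD k 1)).sum
      = (labels.map (fun l => pvScoreMap.getD l 1)).sum := by
  have hnd : (PySem.Set.ofList labels).Nodup := PySem.Set.nodup_ofList labels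
  have hfs : (PySem.Set.ofList labels).toFinset = labels.toFinset := by
    ext x; simp [List.mem_toFinset, PySem.Set.mem_ofList]
  rw [← List.sum_toFinset _ hnd, hfs, Finset.sum_list_map_count]
  refine Finset.sum_congr rfl fun m hm => ?_
  simp

theorem calculate_base_points_spec_aux (detections : List (List (String × String))) :
    calculate_base_points detections = calculate_base_points_alt detections := by
  unfold calculate_base_points_alt
  simp only [pvB_counts, PySem.Dict.items_counter]
  rw [pvA_eq_sum, ← pvCountSum (detections.map (fun det => (PySem.Dict.mk det).getD "label" ""))]
  simp [List.map_map, Function.comp_def]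

-- ===== VERDICT (by name: the statement is the Claim_ definition above) =====
theorem calculate_base_points_spec : Claim_equal_calculate_base_points := by
  intro detections _ _
  exact calculate_base_points_spec_aux detections
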